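-- pv_equiv track=rewrite | github.com/teratensor/Prediction | 5_ball_predict/3_ball3_ml/predict.py | predict_ball3
-- ===== SOURCE A (Python) =====
-- from typing import List, Dict, Tuple, Set
-- from collections import Counter
--
-- def predict_ball3(
--     used_balls: Set[int],
--     past_data: List[Dict],
--     top_k: int = 5
-- ) -> List[Tuple[int, float]]:
--     """
--     ball3 예측
--
--     Args:
--         used_balls: 이미 사용된 번호들 {ball1, ball2, ball6}
--         past_data: 과거 데이터
--         top_k: 상위 K개 반환
--
--     Returns:
--         [(ball3, score), ...] 점수 높은 순
--     """
--     recent_10 = past_data[-10:] if len(past_data) >= 10 else past_data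
--     recent_20 = past_data[-20:] if len(past_data) >= 20 else past_data
--
--     # ball3 빈도
--     freq_10 = Counter(d['ball3'] for d in recent_10)
--     freq_20 = Counter(d['ball3'] for d in recent_20)
--
--     candidates = []
--     for num in range(1, 46):
--         if num in used_balls:
--             continue
--
--         # 빈도 점수
--         freq_score = freq_10.get(num, 0) * 2 + freq_20.get(num, 0)
--         candidates.append((num, freq_score))
--
--     candidates.sort(key=lambda x: -x[1])
--     return candidates[:top_k]
-- ===== SOURCE B (Python) =====
-- from collections import Counter
--
-- def predict_ball3(used_balls, past_data, top_k=5):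
--     # Counting-sort selection: scores are bounded (0..40), so instead of a
--     # comparison sort we bucket candidates by score and emit buckets from the
--     # highest score down; within a bucket numbers stay in ascending order,
--     # which is exactly the stable sort's tie order.
--     recent_10 = past_data[-10:]
--     recent_20 = past_data[-20:]
--     freq_10 = Counter(d['ball3'] for d in recent_10)
--     freq_20 = Counter(d['ball3'] for d in recent_20)
--
--     buckets = {}
--     for num in range(1, 46):
--         if num in used_balls:
--             continue
--         s = freq_10.get(num, 0) * 2 + freq_20.get(num, 0)
--         buckets.setdefault(s, []).append(num)
--
--     out = []
--     for s in range(40, -1, -1):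
--         for num in buckets.get(s, []):
--             out.append((num, s))
--     return out[:top_k]
-- ===== Notes on version B (the rewrite author's own statement) =====
-- stated objective: alternative
-- what changed: Replaces the comparison sort (candidates.sort by -score) with a counting-sort selection: candidates are bucketed by their bounded score (0..40) into a dict of lists and emitted from the highest bucket down, reproducing the stable sort's tie order without sorting.
import Mathlib
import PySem

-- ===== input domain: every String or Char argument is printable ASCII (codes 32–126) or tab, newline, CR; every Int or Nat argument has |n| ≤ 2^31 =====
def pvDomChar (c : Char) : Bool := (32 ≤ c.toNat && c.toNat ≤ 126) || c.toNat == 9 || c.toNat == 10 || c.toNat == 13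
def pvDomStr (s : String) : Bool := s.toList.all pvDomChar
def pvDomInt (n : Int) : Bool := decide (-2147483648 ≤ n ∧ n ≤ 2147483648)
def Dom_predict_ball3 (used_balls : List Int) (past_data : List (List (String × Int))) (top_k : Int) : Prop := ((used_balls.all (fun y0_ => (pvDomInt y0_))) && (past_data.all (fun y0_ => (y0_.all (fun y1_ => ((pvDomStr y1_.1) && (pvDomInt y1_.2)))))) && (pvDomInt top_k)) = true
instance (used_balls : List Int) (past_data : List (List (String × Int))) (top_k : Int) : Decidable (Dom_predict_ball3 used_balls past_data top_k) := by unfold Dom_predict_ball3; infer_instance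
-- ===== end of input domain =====

-- B replaces A's comparison sort of the candidates by a counting-sort selection: candidates
-- are bucketed by their bounded score (0..40) and emitted from the highest bucket down.


-- d['ball3'] on a dict given as an assoc list: build the Python dict (last duplicate wins),
-- then look up; default 0 is only reached outside Pre_ (where the Python raises KeyError).
def pvBall3 (d : List (String × Int)) : Int := (PySem.Dict.ofList d).getD "ball3" 0

-- ===== PORT A =====
def predict_ball3 (used_balls : List Int) (past_data : List (List (String × Int))) (top_k : Int) : List (Int × Int) :=
  let recent_10 := if past_data.length ≥ 10 then PySem.List.slice past_data (some (-10)) none else past_data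
  let recent_20 := if past_data.length ≥ 20 then PySem.List.slice past_data (some (-20)) none else past_data
  let freq_10 := PySem.Dict.counter (recent_10.map pvBall3)
  let freq_20 := PySem.Dict.counter (recent_20.map pvBall3)
  let candidates := (PySem.List.pyRange 1 46 1).foldl (fun acc num =>
      if num ∈ used_balls then acc
      else acc ++ [(num, freq_10.getD num 0 * 2 + freq_20.getD num 0)]) []
  PySem.List.slice (PySem.List.sorted candidates (fun x => -x.2) false) none (some top_k)

-- ===== PORT B =====
def predict_ball3_alt (used_balls : List Int) (past_data : List (List (String × Int))) (top_k : Int) : List (Int × Int) :=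
  let recent_10 := PySem.List.slice past_data (some (-10)) none
  let recent_20 := PySem.List.slice past_data (some (-20)) none
  let freq_10 := PySem.Dict.counter (recent_10.map pvBall3)
  let freq_20 := PySem.Dict.counter (recent_20.map pvBall3)
  -- buckets.setdefault(s, []).append(num)  ↦  modify s [] (· ++ [num])
  let buckets := (PySem.List.pyRange 1 46 1).foldl (fun d num =>
      if num ∈ used_balls then d
      else d.modify (freq_10.getD num 0 * 2 + freq_20.getD num 0) [] (· ++ [num]))
      (PySem.Dict.empty : PySem.Dict Int (List Int))
  let out := (PySem.List.pyRange 40 (-1) (-1)).foldl (fun acc s =>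
      acc ++ (buckets.getD s []).map (fun num => (num, s))) []
  PySem.List.slice out none (some top_k)

-- ===== PRECONDITION & SPEC =====
-- A reads d['ball3'] of every draw in the last 20 entries; Pre_ excludes exactly the inputs
-- where such a dict lacks the key 'ball3' (Python raises KeyError there).
def Pre_predict_ball3 (used_balls : List Int) (past_data : List (List (String × Int))) (top_k : Int) : Prop :=
  (past_data.drop (past_data.length - 20)).all (fun d => (PySem.Dict.ofList d).contains "ball3") = true
instance (used_balls : List Int) (past_data : List (List (String × Int))) (top_k : Int) : Decidable (Pre_predict_ball3 used_balls past_data top_k) := by unfold Pre_predict_ball3; infer_instance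

def pvWitness_predict_ball3 : List Int × (List (List (String × Int))) × Int :=
  ([1, 7], [[("ball3", 5)], [("ball3", 9)]], 3)

def Spec_predict_ball3 (used_balls : List Int) (past_data : List (List (String × Int))) (top_k : Int) (out : List (Int × Int)) : Prop := out = predict_ball3_alt used_balls past_data top_k
instance (used_balls : List Int) (past_data : List (List (String × Int))) (top_k : Int) (out : List (Int × Int)) : Decidable (Spec_predict_ball3 used_balls past_data top_k out) := by unfold Spec_predict_ball3; infer_instance

-- ===== CLAIM (what is proved, stated in full; the proofs are below) =====
def Claim_equal_predict_ball3 : Prop := ∀ (used_balls : List Int) (past_data : List (List (String × Int))) (top_k : Int), Dom_predict_ball3 used_balls past_data top_k → Pre_predict_ball3 used_balls past_data top_k → Spec_predict_ball3 used_balls past_data top_k (predict_ball3 used_balls past_data top_k)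

-- ===== LEMMAS AND PROOFS =====

-- A's recent_10 / recent_20 conditionals, normalised to drops
theorem pv_recent20 (past_data : List (List (String × Int))) :
    (if past_data.length ≥ 20 then PySem.List.slice past_data (some (-20)) none else past_data)
      = past_data.drop (past_data.length - 20) := by
  rw [PySem.List.slice_from_neg_ofNat past_data 20 (by omega)]
  split <;> [rfl; (rw [Nat.sub_eq_zero_of_le (by omega), List.drop_zero])]

theorem pv_recent10 (past_data : List (List (String × Int))) :
    (if past_data.length ≥ 10 then PySem.List.slice past_data (some (-10)) none else past_data)
      = past_data.drop (past_data.length - 10) := by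
  rw [PySem.List.slice_from_neg_ofNat past_data 10 (by omega)]
  split <;> [rfl; (rw [Nat.sub_eq_zero_of_le (by omega), List.drop_zero])]

-- the scores B buckets by are exactly 0..40 (counts of ≤10- and ≤20-element lists)
theorem pv_score_bounds (past_data : List (List (String × Int))) (n : Int) :
    0 ≤ (PySem.Dict.counter ((past_data.drop (past_data.length - 10)).map pvBall3)).getD n 0 * 2
        + (PySem.Dict.counter ((past_data.drop (past_data.length - 20)).map pvBall3)).getD n 0
    ∧ (PySem.Dict.counter ((past_data.drop (past_data.length - 10)).map pvBall3)).getD n 0 * 2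
        + (PySem.Dict.counter ((past_data.drop (past_data.length - 20)).map pvBall3)).getD n 0 ≤ 40 := by
  rw [PySem.Dict.getD_counter, PySem.Dict.getD_counter]
  have h10 : ((past_data.drop (past_data.length - 10)).map pvBall3).count n
      ≤ ((past_data.drop (past_data.length - 10)).map pvBall3).length := List.count_le_length
  have h20 : ((past_data.drop (past_data.length - 20)).map pvBall3).count n
      ≤ ((past_data.drop (past_data.length - 20)).map pvBall3).length := List.count_le_length
  simp only [List.length_map, List.length_drop] at h10 h20
  omega

-- insertBy walks past a block it does not go before
theorem pv_insertBy_prefix {α : Type} (before : α → α → Bool) (x : α) (L M : List α)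
    (h : ∀ y ∈ L, before x y = false) :
    PySem.List.insertBy before x (L ++ M) = L ++ PySem.List.insertBy before x M := by
  induction L with
  | nil => simp
  | cons a L ih =>
    have hstep : PySem.List.insertBy before x (a :: (L ++ M))
        = if before x a then x :: a :: (L ++ M) else a :: PySem.List.insertBy before x (L ++ M) := rfl
    simp only [List.cons_append, hstep, h a (by simp), if_false, Bool.false_eq_true]
    rw [ih (fun y hy => h y (by simp [hy]))]

-- insertBy stops in front of a block it goes before everywhere
theorem pv_insertBy_front {α : Type} (before : α → α → Bool) (x : α) (M : List α)
    (h : ∀ y ∈ M, before x y = true) :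
    PySem.List.insertBy before x M = x :: M := by
  cases M with
  | nil => rfl
  | cons a M =>
    have hstep : PySem.List.insertBy before x (a :: M)
        = if before x a then x :: a :: M else a :: PySem.List.insertBy before x M := rfl
    rw [hstep, h a (by simp), if_pos rfl]

theorem pv_flatMap_congr {α β : Type} (ks : List α) (f g : α → List β)
    (h : ∀ k ∈ ks, f k = g k) : ks.flatMap f = ks.flatMap g := by
  induction ks with
  | nil => rfl
  | cons k ks ih =>
    simp only [List.flatMap_cons, h k (by simp), ih (fun k' hk' => h k' (by simp [hk']))]

-- stable insertion of x into a list bucketed by strictly increasing keys ks appends x at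
-- the end of its own bucket
theorem pv_insertBy_buckets {α : Type} (key : α → Int) (x : α) (p : List α) (ks : List Int)
    (hks : ks.Pairwise (· < ·)) (hx : key x ∈ ks) :
    PySem.List.insertBy (fun a b => decide (key a < key b)) x
        (ks.flatMap (fun k => p.filter (fun y => key y == k)))
      = ks.flatMap (fun k => (p ++ [x]).filter (fun y => key y == k)) := by
  induction ks with
  | nil => cases hx
  | cons k ks ih =>
    rcases List.pairwise_cons.mp hks with ⟨hlt, htail⟩
    have hbucket : ∀ k' : Int, ∀ y ∈ p.filter (fun y => key y == k'), key y = k' := by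
      intro k' y hy
      exact beq_iff_eq.mp (List.mem_filter.mp hy).2
    simp only [List.flatMap_cons]
    by_cases hxk : key x = k
    · rw [pv_insertBy_prefix _ _ _ _ (by
        intro y hy
        rw [hbucket k y hy]
        simp [hxk])]
      rw [pv_insertBy_front _ _ _ (by
        intro y hy
        rcases List.mem_flatMap.mp hy with ⟨k', hk', hy'⟩
        rw [hbucket k' y hy']
        simp [hxk]
        exact hlt k' hk')]
      have h1 : (p ++ [x]).filter (fun y => key y == k) = p.filter (fun y => key y == k) ++ [x] := by
        simp [List.filter_append, hxk]
      have h2 : ks.flatMap (fun k' => (p ++ [x]).filter (fun y => key y == k'))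
          = ks.flatMap (fun k' => p.filter (fun y => key y == k')) := by
        apply pv_flatMap_congr
        intro k' hk'
        have : key x ≠ k' := by
          have := hlt k' hk'; omega
        simp [List.filter_append, this]
      rw [h1, h2, List.append_assoc]
      rfl
    · have hx' : key x ∈ ks := by
        rcases List.mem_cons.mp hx with h | h
        · exact absurd h hxk
        · exact h
      rw [pv_insertBy_prefix _ _ _ _ (by
        intro y hy
        rw [hbucket k y hy]
        have := hlt (key x) hx'
        simp; omega)]
      rw [ih htail hx']
      have h1 : (p ++ [x]).filter (fun y => key y == k) = p.filter (fun y => key y == k) := by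
        simp [List.filter_append, hxk]
      rw [h1]

-- Python's stable sort of xs by an Int key equals concatenating, for each possible key in
-- ascending order, the elements of xs with that key in their original order
theorem pv_sorted_eq_buckets {α : Type} (key : α → Int) (xs : List α) (ks : List Int)
    (hks : ks.Pairwise (· < ·)) (hmem : ∀ x ∈ xs, key x ∈ ks) :
    PySem.List.sorted xs key false = ks.flatMap (fun k => xs.filter (fun y => key y == k)) := by
  rw [PySem.List.sorted_eq_foldl_insertBy]
  induction xs using List.reverseRecOn with
  | nil => simp
  | append_singleton p x ih =>
    rw [List.foldl_append, List.foldl_cons, List.foldl_nil,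
        ih (fun y hy => hmem y (by simp [hy]))]
    exact pv_insertBy_buckets key x p ks hks (hmem x (by simp))

-- A's candidate loop, as a map over the unused numbers
theorem pv_candidates_eq (ub : List Int) (f : Int → Int) :
    (PySem.List.pyRange 1 46 1).foldl (fun acc num =>
        if num ∈ ub then acc else acc ++ [(num, f num)]) []
      = ((PySem.List.pyRange 1 46 1).filter (fun n => decide (¬ n ∈ ub))).map (fun n => (n, f n)) := by
  have h1 : (PySem.List.pyRange 1 46 1).foldl (fun acc num =>
        if num ∈ ub then acc else acc ++ [(num, f num)]) []
      = (PySem.List.pyRange 1 46 1).foldl (fun acc num =>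
        if ¬ num ∈ ub then acc ++ [(num, f num)] else acc) [] := by
    simp only [ite_not]
  rw [h1, PySem.List.foldl_append_ite (fun num => ¬ num ∈ ub) (fun num => (num, f num))]
  simp

-- B's bucket dict: bucket s holds exactly the unused numbers of score s, in ascending order
theorem pv_bucket_getD (ub : List Int) (f : Int → Int) (s : Int) :
    ((PySem.List.pyRange 1 46 1).foldl (fun d num =>
        if num ∈ ub then d else d.modify (f num) [] (· ++ [num]))
        (PySem.Dict.empty : PySem.Dict Int (List Int))).getD s []
      = ((PySem.List.pyRange 1 46 1).filter (fun n => decide (¬ n ∈ ub))).filter (fun n => f n == s) := by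
  have h1 : (PySem.List.pyRange 1 46 1).foldl (fun d num =>
        if num ∈ ub then d else d.modify (f num) [] (· ++ [num]))
        (PySem.Dict.empty : PySem.Dict Int (List Int))
      = ((PySem.List.pyRange 1 46 1).filter (fun n => decide (¬ n ∈ ub))).foldl
          (fun d num => d.modify (f num) [] (· ++ [num])) PySem.Dict.empty := by
    rw [← PySem.List.foldl_ite_eq_foldl_filter (fun num => ¬ num ∈ ub)]
    simp only [ite_not]
  rw [h1]
  have h2 : (((PySem.List.pyRange 1 46 1).filter (fun n => decide (¬ n ∈ ub))).foldl
          (fun d num => d.modify (f num) [] (· ++ [num])) PySem.Dict.empty)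
      = ((((PySem.List.pyRange 1 46 1).filter (fun n => decide (¬ n ∈ ub))).map
            (fun n => (f n, n))).foldl
          (fun d p => d.modify p.1 [] (· ++ [p.2])) PySem.Dict.empty) := by
    rw [List.foldl_map]
  rw [h2, PySem.Dict.getD_foldl_modify_append, PySem.Dict.getD_empty, List.nil_append,
      List.filter_map, List.map_map]
  simp [Function.comp_def]

-- negating an Int beq
theorem pv_beq_neg (a b : Int) : ((-a == -b) = (a == b)) := by
  by_cases h : a = b
  · simp [h]
  · simp [h]

theorem pv_ks_pairwise : (((PySem.List.pyRange 40 (-1) (-1)).map (fun s => -s)).Pairwise (· < ·)) := by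
  rw [PySem.List.pyRange_neg_one_eq_reverse, List.map_reverse, List.pairwise_reverse, List.pairwise_map]
  exact (PySem.List.pairwise_lt_pyRange_one _ _).imp (fun h => by omega)

-- the heart of the equivalence: for bounded scores, stable sort by descending score equals
-- emitting the score buckets from 40 down to 0
theorem pv_main (ub : List Int) (f : Int → Int) (hb : ∀ n, 0 ≤ f n ∧ f n ≤ 40) :
    PySem.List.sorted ((PySem.List.pyRange 1 46 1).foldl (fun acc num =>
        if num ∈ ub then acc else acc ++ [(num, f num)]) []) (fun x => -x.2) false
      = (PySem.List.pyRange 40 (-1) (-1)).foldl (fun acc s =>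
          acc ++ (((PySem.List.pyRange 1 46 1).foldl (fun d num =>
              if num ∈ ub then d else d.modify (f num) [] (· ++ [num]))
              (PySem.Dict.empty : PySem.Dict Int (List Int))).getD s []).map
            (fun num => (num, s))) [] := by
  have hbkt := pv_bucket_getD ub f
  simp only [hbkt]
  rw [PySem.List.foldl_append_eq_flatMap
      (fun s => ((((PySem.List.pyRange 1 46 1).filter (fun n => decide (¬ n ∈ ub))).filter
          (fun n => f n == s)).map (fun num => (num, s)))), List.nil_append]
  rw [pv_candidates_eq ub f]
  set nums := (PySem.List.pyRange 1 46 1).filter (fun n => decide (¬ n ∈ ub)) with hnums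
  rw [pv_sorted_eq_buckets (fun x => -x.2) (nums.map (fun n => (n, f n)))
        ((PySem.List.pyRange 40 (-1) (-1)).map (fun s => -s))
        pv_ks_pairwise
        (by
          intro x hx
          rcases List.mem_map.mp hx with ⟨n, _, rfl⟩
          rcases hb n with ⟨h0, h40⟩
          exact List.mem_map.mpr ⟨f n, PySem.List.mem_pyRange_neg_one.mpr ⟨by omega, by omega⟩, rfl⟩)]
  rw [List.flatMap_map]
  apply pv_flatMap_congr
  intro s _
  have h1 : (nums.map (fun n => (n, f n))).filter (fun y => -y.2 == -s)
      = (nums.map (fun n => (n, f n))).filter (fun y => y.2 == s) := by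
    apply List.filter_congr
    intro y _
    exact pv_beq_neg y.2 s
  rw [h1, List.filter_map]
  have h2 : (nums.filter ((fun y => y.2 == s) ∘ (fun n => (n, f n)))) = nums.filter (fun n => f n == s) := rfl
  rw [h2]
  apply List.map_congr_left
  intro n hn
  have := beq_iff_eq.mp (List.mem_filter.mp hn).2
  simp [this]

theorem predict_ball3_spec : Claim_equal_predict_ball3 := by
  intro ub pd k _ _
  show predict_ball3 ub pd k = predict_ball3_alt ub pd k
  simp only [predict_ball3, predict_ball3_alt]
  rw [pv_recent10, pv_recent20,
      PySem.List.slice_from_neg_ofNat pd 10 (by omega),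
      PySem.List.slice_from_neg_ofNat pd 20 (by omega)]
  exact congrArg (fun l => PySem.List.slice l none (some k))
    (pv_main ub (fun n =>
        (PySem.Dict.counter ((pd.drop (pd.length - 10)).map pvBall3)).getD n 0 * 2
        + (PySem.Dict.counter ((pd.drop (pd.length - 20)).map pvBall3)).getD n 0)
      (pv_score_bounds pd))
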